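-- pv_equiv track=rewrite | github.com/KaeMrn/Epitech-T-PRE-500 | day2/example.py | calculate_series_sum
-- ===== SOURCE A (Python) =====
-- def calculate_series_sum(n):
--     series_sum = 0
--     current_term = 1
--     series = []  # To store the series terms
--
--     for _ in range(n):
--         series.append(current_term)  # Append the current term to the series
--         series_sum += current_term
--         current_term = current_term * 10 + 1
--
--     return series, series_sum
-- ===== SOURCE B (Python) =====
-- def calculate_series_sum(n):
--     series = [(10 ** (k + 1) - 1) // 9 for k in range(n)]
--     return series, sum(series)
-- ===== Notes on version B (the rewrite author's own statement) =====
-- stated objective: simpler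
-- what changed: Each repunit term is computed independently by the closed form (10**(k+1)-1)//9 in a list comprehension and summed, replacing A's running current_term*10+1 accumulator loop.
import Mathlib
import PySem

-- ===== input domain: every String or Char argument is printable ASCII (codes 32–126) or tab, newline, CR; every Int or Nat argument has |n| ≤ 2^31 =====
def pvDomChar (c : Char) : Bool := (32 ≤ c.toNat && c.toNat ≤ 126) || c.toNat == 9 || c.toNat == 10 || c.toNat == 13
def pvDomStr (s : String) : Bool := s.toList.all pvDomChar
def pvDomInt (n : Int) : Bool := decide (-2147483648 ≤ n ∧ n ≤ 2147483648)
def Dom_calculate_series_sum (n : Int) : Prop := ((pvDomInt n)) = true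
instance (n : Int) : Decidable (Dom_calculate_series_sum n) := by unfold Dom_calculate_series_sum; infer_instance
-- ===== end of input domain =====

-- B computes each repunit term by the closed form (10^(k+1)-1)//9 instead of A's running accumulator; objective: simpler.


-- ===== PORT A =====
-- loop state: (series_sum, current_term, series)
def calculate_series_sum (n : Int) : List Int × Int :=
  let st := (PySem.List.pyRange 0 n 1).foldl
    (fun (st : Int × Int × List Int) _ => (st.1 + st.2.1, st.2.1 * 10 + 1, st.2.2 ++ [st.2.1]))
    (0, 1, [])
  (st.2.2, st.1)

-- ===== PORT B =====
def calculate_series_sum_alt (n : Int) : List Int × Int :=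
  let series := (PySem.List.pyRange 0 n 1).map
    (fun k => PySem.Int.floordiv (10 ^ (k + 1).toNat - 1) 9)
  (series, series.sum)

-- ===== PRECONDITION & SPEC =====
def Spec_calculate_series_sum (n : Int) (out : List Int × Int) : Prop := out = calculate_series_sum_alt n
instance (n : Int) (out : List Int × Int) : Decidable (Spec_calculate_series_sum n out) := by unfold Spec_calculate_series_sum; infer_instance

-- ===== CLAIM (what is proved, stated in full; the proofs are below) =====
def Claim_equal_calculate_series_sum : Prop := ∀ (n : Int), Dom_calculate_series_sum n → Spec_calculate_series_sum n (calculate_series_sum n)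

-- ===== LEMMAS AND PROOFS =====

-- the running accumulator of A after k steps (the (k+1)-digit repunit)
def pvRep : Nat → Int
  | 0 => 1
  | k + 1 => pvRep k * 10 + 1

theorem pvRep_closed (k : Nat) : (10 : Int) ^ (k + 1) - 1 = 9 * pvRep k := by
  induction k with
  | zero => simp [pvRep]
  | succ m ih => rw [pvRep]; rw [pow_succ]; linarith [ih]

theorem pvRep_floordiv (k : Nat) :
    PySem.Int.floordiv ((10 : Int) ^ (k + 1) - 1) 9 = pvRep k := by
  rw [PySem.Int.floordiv_eq_ediv_of_pos (by norm_num), pvRep_closed k,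
    Int.mul_ediv_cancel_left _ (by norm_num)]

theorem pvMain (m : Nat) :
    (PySem.List.pyRange 0 (m : Int) 1).foldl
      (fun (st : Int × Int × List Int) _ => (st.1 + st.2.1, st.2.1 * 10 + 1, st.2.2 ++ [st.2.1]))
      (0, 1, []) =
    (((PySem.List.pyRange 0 (m : Int) 1).map
        (fun k => PySem.Int.floordiv (10 ^ (k + 1).toNat - 1) 9)).sum,
      pvRep m,
      (PySem.List.pyRange 0 (m : Int) 1).map
        (fun k => PySem.Int.floordiv (10 ^ (k + 1).toNat - 1) 9)) := by
  induction m with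
  | zero => simp [PySem.List.pyRange_one_eq_nil (by norm_num : (0:Int) ≤ 0), pvRep]
  | succ m ih =>
    have hsplit : PySem.List.pyRange 0 ((m : Int) + 1) 1
        = PySem.List.pyRange 0 (m : Int) 1 ++ [(m : Int)] :=
      PySem.List.pyRange_one_succ_right (by positivity)
    have hf : PySem.Int.floordiv ((10 : Int) ^ ((m : Int) + 1).toNat - 1) 9 = pvRep m := by
      have : ((m : Int) + 1).toNat = m + 1 := by omega
      rw [this, pvRep_floordiv]
    push_cast
    rw [hsplit, List.foldl_append, List.map_append, ih]
    simp [pvRep]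
    rw [pvRep_closed m, Int.mul_ediv_cancel_left _ (by norm_num)]

-- ===== VERDICT (by name: the statement is the Claim_ definition above) =====
theorem calculate_series_sum_spec : Claim_equal_calculate_series_sum := by
  intro n _
  unfold Spec_calculate_series_sum calculate_series_sum calculate_series_sum_alt
  by_cases h : n ≤ 0
  · simp [PySem.List.pyRange_one_eq_nil h]
  · have hn : ((n.toNat : Nat) : Int) = n := by omega
    rw [← hn, pvMain]
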